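-- pv_equiv track=rewrite | github.com/breivens/scriptingtalen | additional exercise series/series_08 [Python]/H/Homo or hetero.py | homoOrHetero
-- ===== SOURCE A (Python) =====
-- def homoOrHetero(sequence: list) -> str:
--     homo = hetero = False
--     visited = set()
--     for number in sequence:
--         if number in visited:
--             homo = True
--         if visited and number not in visited:
--             hetero = True
--         if homo and hetero:
--             return 'both'
--         visited.add(number)
--     return 'homo' if homo else 'hetero' if hetero else 'nothing'
-- ===== SOURCE B (Python) =====
-- def homoOrHetero(sequence: list) -> str:
--     s = set(sequence)
--     homo = len(s) < len(sequence)
--     hetero = len(s) > 1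
--     if homo and hetero:
--         return 'both'
--     if homo:
--         return 'homo'
--     if hetero:
--         return 'hetero'
--     return 'nothing'
-- ===== Notes on version B (the rewrite author's own statement) =====
-- stated objective: simpler
-- what changed: Replaces A's incremental flag-tracking loop with early exit by a closed-form derivation from set cardinality: homo iff len(set) < len(sequence), hetero iff len(set) > 1.
import Mathlib
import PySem

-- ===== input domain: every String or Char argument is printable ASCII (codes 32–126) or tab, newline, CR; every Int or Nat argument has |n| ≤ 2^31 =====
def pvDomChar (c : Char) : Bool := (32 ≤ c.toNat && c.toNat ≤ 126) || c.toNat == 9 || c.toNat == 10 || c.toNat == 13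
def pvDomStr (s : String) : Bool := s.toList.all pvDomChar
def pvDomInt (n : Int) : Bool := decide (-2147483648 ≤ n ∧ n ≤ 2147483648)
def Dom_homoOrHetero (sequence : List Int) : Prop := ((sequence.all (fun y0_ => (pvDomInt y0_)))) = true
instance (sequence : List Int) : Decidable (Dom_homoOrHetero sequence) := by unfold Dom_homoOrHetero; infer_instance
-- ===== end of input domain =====

-- B replaces A's incremental flag-tracking loop (with early exit) by a closed-form
-- derivation from set cardinality; objective: simpler.

-- ===== PORT A =====
-- the for-loop of A, state = (homo, hetero, visited); returning "both" inside the loop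
-- is the early return
def homoOrHeteroLoop : List Int → Bool → Bool → PySem.Set Int → String
  | [], homo, hetero, _ =>
      if homo then "homo" else if hetero then "hetero" else "nothing"
  | number :: rest, homo, hetero, visited =>
      let homo := if PySem.Set.contains visited number then true else homo
      let hetero := if (!visited.isEmpty) && !(PySem.Set.contains visited number) then true else hetero
      if homo && hetero then "both"
      else homoOrHeteroLoop rest homo hetero (PySem.Set.add visited number)

def homoOrHetero (sequence : List Int) : String :=
  homoOrHeteroLoop sequence false false PySem.Set.empty

-- ===== PORT B =====
def homoOrHetero_alt (sequence : List Int) : String :=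
  let s : PySem.Set Int := PySem.Set.ofList sequence
  let homo := decide (s.length < sequence.length)
  let hetero := decide (1 < s.length)
  if homo && hetero then "both"
  else if homo then "homo"
  else if hetero then "hetero"
  else "nothing"

-- ===== PRECONDITION & SPEC =====
def Spec_homoOrHetero (sequence : List Int) (out : String) : Prop := out = homoOrHetero_alt sequence
instance (sequence : List Int) (out : String) : Decidable (Spec_homoOrHetero sequence out) := by unfold Spec_homoOrHetero; infer_instance

-- ===== CLAIM (what is proved, stated in full; the proofs are below) =====
def Claim_equal_homoOrHetero : Prop := ∀ (sequence : List Int), Dom_homoOrHetero sequence → Spec_homoOrHetero sequence (homoOrHetero sequence)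

-- ===== LEMMAS AND PROOFS =====

-- length of set(pre ++ [n])
lemma len_ofList_append_singleton (pre : List Int) (n : Int) :
    (PySem.Set.ofList (pre ++ [n])).length
      = (PySem.Set.ofList pre).length + (if n ∈ pre then 0 else 1) := by
  rw [PySem.Set.ofList_append_singleton, PySem.Set.add_eq_ite]
  by_cases h : n ∈ pre <;> simp [PySem.Set.mem_ofList, h]

lemma len_ofList_eq_zero_iff (pre : List Int) :
    (PySem.Set.ofList pre).length = 0 ↔ pre = [] := by
  constructor
  · intro h
    cases pre with
    | nil => rfl
    | cons x xs =>
        exfalso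
        have hx : x ∈ PySem.Set.ofList (x :: xs) := by
          rw [PySem.Set.mem_ofList]; exact List.mem_cons_self
        have := List.length_pos_of_mem hx
        omega
  · intro h; subst h; rfl

lemma len_ofList_append_le (q r : List Int) :
    (PySem.Set.ofList (q ++ r)).length ≤ (PySem.Set.ofList q).length + r.length := by
  rw [PySem.Set.ofList_append, PySem.Set.update_eq_append_filter]
  have h1 : ((PySem.Set.ofList r).filter
      (fun y => !(PySem.Set.contains (PySem.Set.ofList q) y))).length
        ≤ (PySem.Set.ofList r).length := List.length_filter_le _ _
  have h2 := PySem.Set.length_ofList_le (xs := r)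
  simp only [List.length_append]
  omega

lemma len_ofList_append_ge (q r : List Int) :
    (PySem.Set.ofList q).length ≤ (PySem.Set.ofList (q ++ r)).length := by
  rw [PySem.Set.ofList_append, PySem.Set.update_eq_append_filter]
  simp

-- homo and hetero are monotone under appending a suffix
lemma homo_mono {q : List Int} (r : List Int)
    (h : (PySem.Set.ofList q).length < q.length) :
    (PySem.Set.ofList (q ++ r)).length < (q ++ r).length := by
  have := len_ofList_append_le q r
  simp only [List.length_append]
  omega

lemma hetero_mono {q : List Int} (r : List Int)
    (h : 1 < (PySem.Set.ofList q).length) :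
    1 < (PySem.Set.ofList (q ++ r)).length := by
  have := len_ofList_append_ge q r
  omega

-- the loop invariant: if the flags and visited set are those produced by the prefix
-- `pre` (and A has not returned "both" yet), the loop computes B's answer on the whole list
lemma loop_eq (rest : List Int) : ∀ (pre : List Int),
    ¬((PySem.Set.ofList pre).length < pre.length ∧ 1 < (PySem.Set.ofList pre).length) →
    homoOrHeteroLoop rest (decide ((PySem.Set.ofList pre).length < pre.length))
        (decide (1 < (PySem.Set.ofList pre).length)) (PySem.Set.ofList pre)
      = homoOrHetero_alt (pre ++ rest) := by
  induction rest with
  | nil =>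
      intro pre hnb
      simp only [List.append_nil, homoOrHeteroLoop, homoOrHetero_alt]
      by_cases h1 : (PySem.Set.ofList pre).length < pre.length <;>
        by_cases h2 : 1 < (PySem.Set.ofList pre).length <;>
        simp [h1, h2] at hnb ⊢
  | cons n rest ih =>
      intro pre hnb
      have hle := PySem.Set.length_ofList_le (xs := pre)
      have hkey := len_ofList_append_singleton pre n
      -- the updated flags are exactly B's flags for the prefix pre ++ [n]
      have hhomo : ((if PySem.Set.contains (PySem.Set.ofList pre) n then true
            else decide ((PySem.Set.ofList pre).length < pre.length)))
          = decide ((PySem.Set.ofList (pre ++ [n])).length < (pre ++ [n]).length) := by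
        by_cases hn : n ∈ pre
        · simp [PySem.Set.mem_ofList, hn, hkey, List.length_append]
          exact hle
        · simp [PySem.Set.mem_ofList, hn, hkey, List.length_append]
      have hhet : ((if (!(PySem.Set.ofList pre).isEmpty)
              && !(PySem.Set.contains (PySem.Set.ofList pre) n) then true
            else decide (1 < (PySem.Set.ofList pre).length)))
          = decide (1 < (PySem.Set.ofList (pre ++ [n])).length) := by
        have hz := len_ofList_eq_zero_iff pre
        by_cases hn : n ∈ pre
        · simp [PySem.Set.mem_ofList, hn, hkey]
        · by_cases hp : pre = []
          · subst hp
            simp [PySem.Set.ofList]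
          · have hne : (PySem.Set.ofList pre) ≠ [] := by
              intro hc
              exact hp (hz.mp (by rw [hc]; rfl))
            have hpos : 0 < (PySem.Set.ofList pre).length :=
              List.length_pos_of_ne_nil hne
            simp [PySem.Set.mem_ofList, hn, hkey, hne]
            omega
      simp only [homoOrHeteroLoop, hhomo, hhet]
      by_cases hb : (PySem.Set.ofList (pre ++ [n])).length < (pre ++ [n]).length
          ∧ 1 < (PySem.Set.ofList (pre ++ [n])).length
      · -- A returns "both"; B's flags on the whole list are both true by monotonicity
        have hH := homo_mono (q := pre ++ [n]) rest hb.1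
        have hT := hetero_mono (q := pre ++ [n]) rest hb.2
        rw [List.append_assoc, List.singleton_append] at hH hT
        have h1 : (PySem.Set.ofList (pre ++ [n])).length ≤ pre.length := by
          have := hb.1
          simp only [List.length_append, List.length_cons, List.length_nil] at this
          omega
        have hH' : (PySem.Set.ofList (pre ++ n :: rest)).length
            < pre.length + (rest.length + 1) := by
          have := hH
          simp only [List.length_append, List.length_cons] at this
          omega
        simp [homoOrHetero_alt, h1, hb.2, hH', hT]
      · -- recurse: the new visited set is set(pre ++ [n])
        have hvis : PySem.Set.add (PySem.Set.ofList pre) n = PySem.Set.ofList (pre ++ [n]) :=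
          (PySem.Set.ofList_append_singleton pre n).symm
        have hiff : ¬(decide ((PySem.Set.ofList (pre ++ [n])).length < (pre ++ [n]).length)
            && decide (1 < (PySem.Set.ofList (pre ++ [n])).length)) = true := by
          simp only [Bool.and_eq_true, decide_eq_true_eq]
          exact hb
        rw [if_neg hiff, hvis, ih (pre ++ [n]) hb, List.append_assoc]
        rfl

-- ===== VERDICT (by name: the statement is the Claim_ definition above) =====
theorem homoOrHetero_spec : Claim_equal_homoOrHetero := by
  intro sequence _
  unfold Spec_homoOrHetero homoOrHetero
  have h := loop_eq sequence [] (by simp [PySem.Set.ofList])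
  simpa [PySem.Set.ofList, PySem.Set.empty] using h
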